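-- pv_equiv track=rewrite | github.com/ayush2k5-cpu/gapsADI | backend/rag/load_scripts.py | _split_into_scenes
-- ===== SOURCE A (Python) =====
-- def _split_into_scenes(text: str) -> list[str]:
--     """Split screenplay text into scene chunks on INT./EXT. headings.
--
--     Args:
--         text: Raw screenplay text content.
--
--     Returns:
--         List of scene chunk strings (each starting with a scene heading).
--     """
--     lines = text.splitlines()
--     chunks: list[str] = []
--     current_chunk: list[str] = []
--
--     for line in lines:
--         stripped = line.strip()
--         if stripped.startswith("INT.") or stripped.startswith("EXT."):
--             if current_chunk:
--                 chunks.append("\n".join(current_chunk))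
--             current_chunk = [line]
--         else:
--             current_chunk.append(line)
--
--     if current_chunk:
--         chunks.append("\n".join(current_chunk))
--
--     return chunks
-- ===== SOURCE B (Python) =====
-- def _is_heading(line):
--     stripped = line.strip()
--     return stripped.startswith("INT.") or stripped.startswith("EXT.")
--
--
-- def _split_into_scenes(text: str) -> list[str]:
--     """Split screenplay text into scene chunks on INT./EXT. headings."""
--     lines = text.splitlines()
--     chunks: list[str] = []
--     while lines:
--         k = 1
--         while k < len(lines) and not _is_heading(lines[k]):
--             k += 1
--         chunks.append("\n".join(lines[:k]))
--         lines = lines[k:]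
--     return chunks
-- ===== Notes on version B (the rewrite author's own statement) =====
-- stated objective: alternative
-- what changed: Replaces A's accumulator-and-flush single pass (current_chunk buffer flushed at each heading and at the end) by boundary slicing: scan for the next heading index k and emit the slice lines[:k], then continue on lines[k:], so no buffer or end-of-loop flush exists.
import Mathlib
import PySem

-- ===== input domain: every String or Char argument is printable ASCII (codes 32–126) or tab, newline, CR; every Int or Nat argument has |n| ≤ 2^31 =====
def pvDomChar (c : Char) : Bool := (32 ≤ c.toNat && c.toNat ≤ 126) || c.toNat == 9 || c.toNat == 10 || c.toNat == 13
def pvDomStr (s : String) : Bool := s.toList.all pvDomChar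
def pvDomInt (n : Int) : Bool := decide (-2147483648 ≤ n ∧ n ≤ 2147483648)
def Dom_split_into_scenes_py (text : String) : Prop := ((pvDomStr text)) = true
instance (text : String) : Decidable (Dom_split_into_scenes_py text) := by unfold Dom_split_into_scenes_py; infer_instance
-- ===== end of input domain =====

-- B replaces A's accumulator-and-flush pass by boundary scanning and slicing (objective: alternative, same cost).

-- ===== PORT A =====
-- 'stripped.startswith("INT.") or stripped.startswith("EXT.")' (B's Python names it _is_heading)
def pvIsHeading (line : String) : Bool :=
  let stripped := PySem.Str.strip line
  PySem.Str.startswith stripped "INT." || PySem.Str.startswith stripped "EXT."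

-- the body of A's for-loop over lines, state = (chunks, current_chunk)
def pvStepA (st : List String × List String) (line : String) : List String × List String :=
  let (chunks, current) := st
  if pvIsHeading line then
    (if current ≠ [] then chunks ++ [PySem.Str.join "\n" current] else chunks, [line])
  else
    (chunks, current ++ [line])

def split_into_scenes_py (text : String) : List String :=
  let lines := PySem.Str.splitlines text
  let st := lines.foldl pvStepA ([], [])
  if st.2 ≠ [] then st.1 ++ [PySem.Str.join "\n" st.2] else st.1

-- ===== PORT B =====
-- B's inner while loop: k starts at 1 and advances past non-heading lines of the tail
def pvKScan : List String → Nat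
  | [] => 0
  | l :: rest => if pvIsHeading l then 0 else 1 + pvKScan rest

-- B's outer while loop: emit '\n'.join(lines[:k]) and continue on lines[k:]
def pvLoopB : List String → List String
  | [] => []
  | l :: rest =>
    let k := pvKScan rest
    PySem.Str.join "\n" (l :: rest.take k) :: pvLoopB (rest.drop k)
termination_by lines => lines.length
decreasing_by
  simp only [List.length_cons, List.length_drop]
  omega

def split_into_scenes_py_alt (text : String) : List String :=
  pvLoopB (PySem.Str.splitlines text)

-- ===== PRECONDITION & SPEC =====
def Spec_split_into_scenes_py (text : String) (out : List String) : Prop := out = split_into_scenes_py_alt text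
instance (text : String) (out : List String) : Decidable (Spec_split_into_scenes_py text out) := by unfold Spec_split_into_scenes_py; infer_instance

-- ===== CLAIM (what is proved, stated in full; the proofs are below) =====
def Claim_equal_split_into_scenes_py : Prop := ∀ (text : String), Dom_split_into_scenes_py text → Spec_split_into_scenes_py text (split_into_scenes_py text)

-- ===== LEMMAS AND PROOFS =====

-- A's fold-and-flush, run with a nonempty current chunk, emits that chunk extended to the
-- next heading and then agrees with B's boundary loop on the remainder.
theorem pvFold_nonempty :
    ∀ (lines chunks current : List String), current ≠ [] →
    (let st := lines.foldl pvStepA (chunks, current)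
     if st.2 ≠ [] then st.1 ++ [PySem.Str.join "\n" st.2] else st.1)
    = chunks ++ PySem.Str.join "\n" (current ++ lines.take (pvKScan lines))
        :: pvLoopB (lines.drop (pvKScan lines))
  | [], chunks, current, h => by
    simp [pvKScan, pvLoopB, h]
  | l :: rest, chunks, current, h => by
    by_cases hl : pvIsHeading l = true
    · have step : pvStepA (chunks, current) l
          = (chunks ++ [PySem.Str.join "\n" current], [l]) := by
        simp [pvStepA, hl, h]
      have ih := pvFold_nonempty rest (chunks ++ [PySem.Str.join "\n" current]) [l]
        (by simp)
      simp only [List.foldl_cons, step] at ih ⊢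
      rw [ih]
      simp [pvKScan, hl, pvLoopB]
    · have step : pvStepA (chunks, current) l = (chunks, current ++ [l]) := by
        simp [pvStepA, hl]
      have ih := pvFold_nonempty rest chunks (current ++ [l])
        (by simp)
      simp only [List.foldl_cons, step] at ih ⊢
      rw [ih]
      simp [pvKScan, hl, Nat.add_comm 1 (pvKScan rest), List.append_assoc]

theorem pvA_eq_pvB (lines : List String) :
    (let st := lines.foldl pvStepA ([], [])
     if st.2 ≠ [] then st.1 ++ [PySem.Str.join "\n" st.2] else st.1)
    = pvLoopB lines := by
  cases lines with
  | nil => simp [pvLoopB]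
  | cons l rest =>
    have step : pvStepA ([], []) l = ([], [l]) := by
      by_cases hl : pvIsHeading l = true <;> simp [pvStepA, hl]
    have := pvFold_nonempty rest [] [l] (by simp)
    simp only [List.foldl_cons, step] at *
    rw [this]
    simp [pvLoopB]

-- ===== VERDICT (by name: the statement is the Claim_ definition above) =====
theorem split_into_scenes_py_spec : Claim_equal_split_into_scenes_py := by
  intro text _
  unfold Spec_split_into_scenes_py split_into_scenes_py split_into_scenes_py_alt
  exact pvA_eq_pvB (PySem.Str.splitlines text)
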